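-- pv_equiv track=rewrite | github.com/d89012255/asr_demo1218 | predict_speech_file11.py | post_process_4
-- ===== SOURCE A (Python) =====
-- def post_process_4(input):
--     second_team = ["i","e","u"]
--     third_team = ["i","an","u"]
--     forth_team = ["i","s","i","u"]
--     fifth_team = ["i","w","u","u"]
--     sixth_team = ["i","l","iu","u"]
--
--
--
--
--
--     first_team = ["i","yi","u"]
--
--     mix = [second_team,third_team,forth_team,fifth_team,sixth_team,first_team]
--     table= ["第二組","第三組","第四組","第五組","第六組","第一組"]
--     all = ""
--     for i in range(len(input)):
--         all+=(input[i][:-1]+" ")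
--     temp_for_check = all
--     for i in range(len(mix)):
--         temp_for_check = all
--         for b in range(len(mix[i])):
--
--             if(mix[i][b] in temp_for_check):
--                 temp_for_check = temp_for_check[temp_for_check.find(mix[i][b])+len(mix[i][b]):]
--
--                 if(b==len(mix[i])-1):
--                     return str(table[i])
--             else:
--                 break
--             continue
--     return "無法辨識"
-- ===== SOURCE B (Python) =====
-- def post_process_4(input):
--     groups = [["i", "e", "u"],
--               ["i", "an", "u"],
--               ["i", "s", "i", "u"],
--               ["i", "w", "u", "u"],
--               ["i", "l", "iu", "u"],
--               ["i", "yi", "u"]]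
--     labels = ["第二組", "第三組", "第四組", "第五組", "第六組", "第一組"]
--     text = "".join(w[:-1] + " " for w in input)
--     # one left-to-right pass over the text, driving all six token automata in parallel:
--     # each state is (remaining tokens, minimal position the next token may start at)
--     states = [(toks, 0) for toks in groups]
--     for i in range(len(text)):
--         new = []
--         for toks, pos in states:
--             if toks and pos <= i and text.startswith(toks[0], i):
--                 new.append((toks[1:], i + len(toks[0])))
--             else:
--                 new.append((toks, pos))
--         states = new
--     for (toks, _), label in zip(states, labels):
--         if not toks:
--             return label
--     return "無法辨識"
-- ===== Notes on version B (the rewrite author's own statement) =====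
-- stated objective: alternative
-- what changed: A scans the joined text six times, once per pattern group, repeatedly calling find and re-slicing the remaining suffix; B makes ONE left-to-right pass over the text, driving all six token automata in parallel (each carrying remaining tokens and a minimal start position) and only afterwards picks the first fully-consumed group's label.
import Mathlib
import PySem

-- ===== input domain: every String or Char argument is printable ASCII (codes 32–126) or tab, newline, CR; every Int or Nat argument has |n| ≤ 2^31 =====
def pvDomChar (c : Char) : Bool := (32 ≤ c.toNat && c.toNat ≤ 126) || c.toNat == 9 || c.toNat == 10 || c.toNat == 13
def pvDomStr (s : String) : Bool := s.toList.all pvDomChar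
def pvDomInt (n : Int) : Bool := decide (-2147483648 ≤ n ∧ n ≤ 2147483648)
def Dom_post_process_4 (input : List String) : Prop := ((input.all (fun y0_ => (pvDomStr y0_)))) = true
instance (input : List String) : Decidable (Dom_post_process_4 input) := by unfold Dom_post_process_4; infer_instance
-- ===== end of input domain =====

-- B replaces A's six independent find/slice scans (one per pattern group) by ONE left-to-right
-- pass over the joined text that drives all six token automata in parallel, each state carrying
-- its remaining tokens and the minimal position its next token may start at (same cost).

-- ===== PORT A =====
-- A: all = "" then  for i in range(len(input)): all += input[i][:-1] + " "
def pvAllA (input : List String) : String :=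
  input.foldl (fun acc w => acc ++ (PySem.Str.slice w none (some (-1)) ++ " ")) ""

-- A's inner loop over one group, with the running `temp_for_check`; `false` = the `break`
-- (or an exhausted empty group), `true` = the `return` taken at b == len(mix[i])-1.
def pvCheckA (tokens : List String) (temp : String) : Bool :=
  match tokens with
  | [] => false
  | t :: rest =>
    if PySem.Str.isIn t temp then
      let temp' := PySem.Str.slice temp (some (PySem.Str.find temp t + PySem.Str.len t)) none
      if rest.isEmpty then true else pvCheckA rest temp'
    else false

-- A's outer loop over mix/table (paired), with the final fall-through return.
def pvOuterA (pairs : List (List String × String)) (allStr : String) : String :=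
  match pairs with
  | [] => "無法辨識"
  | (g, lbl) :: rest => if pvCheckA g allStr then lbl else pvOuterA rest allStr

def post_process_4 (input : List String) : String :=
  pvOuterA [(["i","e","u"], "第二組"), (["i","an","u"], "第三組"),
            (["i","s","i","u"], "第四組"), (["i","w","u","u"], "第五組"),
            (["i","l","iu","u"], "第六組"), (["i","yi","u"], "第一組")]
    (pvAllA input)

-- ===== PORT B =====
-- Source B's text = "".join(w[:-1] + " " for w in input)
def pvTextB (input : List String) : String :=
  PySem.Str.join "" (input.map (fun w => PySem.Str.slice w none (some (-1)) ++ " "))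

-- Source B's per-state update at text index i: `if toks and pos <= i and text.startswith(toks[0], i)`.
-- text.startswith(t, i) is ported by hand as startswith on text.drop i (exact: i < len(text) here).
def pvStep (text : List Char) (i : Nat) (st : List String × Nat) : List String × Nat :=
  match st with
  | (toks, pos) =>
    match toks with
    | [] => (toks, pos)
    | t :: rest =>
      if pos ≤ i ∧ PySem.Chars.startswith (text.drop i) t.toList then
        (rest, i + t.toList.length)
      else (toks, pos)

-- Source B's final loop:  for (toks, _), label in zip(states, labels): if not toks: return label
def pvPickB2 (zs : List ((List String × Nat) × String)) : String :=
  match zs with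
  | [] => "無法辨識"
  | (st, lbl) :: rest => if st.1.isEmpty then lbl else pvPickB2 rest

def post_process_4_alt (input : List String) : String :=
  let text := (pvTextB input).toList
  let groups : List (List String) :=
    [["i","e","u"], ["i","an","u"], ["i","s","i","u"],
     ["i","w","u","u"], ["i","l","iu","u"], ["i","yi","u"]]
  let labels : List String := ["第二組","第三組","第四組","第五組","第六組","第一組"]
  let states0 := groups.map (fun toks => (toks, 0))
  let states := (List.range text.length).foldl (fun sts i => sts.map (pvStep text i)) states0
  pvPickB2 (states.zip labels)

-- ===== PRECONDITION & SPEC =====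
def Spec_post_process_4 (input : List String) (out : String) : Prop := out = post_process_4_alt input
instance (input : List String) (out : String) : Decidable (Spec_post_process_4 input out) := by unfold Spec_post_process_4; infer_instance

-- ===== CLAIM (what is proved, stated in full; the proofs are below) =====
def Claim_equal_post_process_4 : Prop := ∀ (input : List String), Dom_post_process_4 input → Spec_post_process_4 input (post_process_4 input)

-- ===== LEMMAS AND PROOFS =====

-- proof-side reference scanner: Python's s.find-from-pos loop, position-based
def pvFindAt (t s : List Char) (i : Nat) : Int :=
  if _h : i + t.length ≤ s.length then
    if PySem.Chars.startswith (s.drop i) t then (i : Int) else pvFindAt t s (i + 1)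
  else -1
termination_by s.length + 1 - i
decreasing_by omega

-- proof-side reference matcher: in-order token matching carrying a single position
def pvSubseq (tokens : List String) (s : List Char) (pos : Nat) : Bool :=
  match tokens with
  | [] => true
  | t :: rest =>
    let i := pvFindAt t.toList s pos
    if i < 0 then false else pvSubseq rest s (i.toNat + t.toList.length)

-- a single group's states through the scan, over an arbitrary index list
def pvScan1 (text : List Char) (idxs : List Nat) (st : List String × Nat) : List String × Nat :=
  idxs.foldl (fun s i => pvStep text i s) st

-- join with the empty separator is flatten
lemma pv_join_empty (ps : List (List Char)) : PySem.Chars.join [] ps = ps.flatten := by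
  induction ps with
  | nil => simp [PySem.Chars.join_nil]
  | cons a l ih =>
    cases l with
    | nil => simp [PySem.Chars.join_singleton]
    | cons b m =>
      rw [PySem.Chars.join_cons_cons]
      simp only [List.flatten_cons] at *
      simp [ih]

-- A's `all += f(w)` loop, on the character-list side
lemma pv_foldl_toList (f : String → String) (input : List String) (acc : String) :
    (input.foldl (fun a w => a ++ f w) acc).toList
      = acc.toList ++ (input.map (fun w => (f w).toList)).flatten := by
  induction input generalizing acc with
  | nil => simp
  | cons w l ih => simp [List.foldl_cons, ih, String.toList_append]

-- A's string accumulation and B's join build the same character list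
lemma pv_all_eq_text (input : List String) : (pvAllA input).toList = (pvTextB input).toList := by
  unfold pvAllA pvTextB
  rw [pv_foldl_toList, PySem.Str.toList_join]
  have h : ("" : String).toList = [] := rfl
  rw [h, pv_join_empty, List.map_map]
  simp [Function.comp_def, String.toList_append, PySem.Str.toList_slice]

-- if t is a prefix of s then s.find(t) points at index 0
lemma pv_find_of_prefix (t s : List Char) (hpre : t <+: s) :
    (PySem.Chars.find s t).toNat = 0 := by
  have hF : 0 ≤ PySem.Chars.find s t :=
    (PySem.Chars.find_nonneg_iff _ _).mpr hpre.isInfix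
  obtain ⟨_, hmin⟩ := PySem.Chars.find_spec hF
  by_contra hne
  exact hmin 0 (Nat.pos_of_ne_zero hne) (by simpa using hpre)

-- peeling one character off the front when t is not a prefix
lemma pv_find_cons (t : List Char) (a : Char) (s' : List Char) (hnp : ¬ t <+: a :: s') :
    PySem.Chars.isIn t (a :: s') = PySem.Chars.isIn t s' ∧
    (PySem.Chars.isIn t s' = true →
      (PySem.Chars.find (a :: s') t).toNat = (PySem.Chars.find s' t).toNat + 1) := by
  by_cases hin' : PySem.Chars.isIn t s' = true
  · have hinf' : t <:+: s' := (PySem.Chars.isIn_iff_infix _ _).mp hin'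
    have hinf : t <:+: a :: s' := List.infix_cons hinf'
    have hin : PySem.Chars.isIn t (a :: s') = true := (PySem.Chars.isIn_iff_infix _ _).mpr hinf
    have hF : 0 ≤ PySem.Chars.find (a :: s') t := (PySem.Chars.find_nonneg_iff _ _).mpr hinf
    have hF' : 0 ≤ PySem.Chars.find s' t := (PySem.Chars.find_nonneg_iff _ _).mpr hinf'
    obtain ⟨hpreF, hminF⟩ := PySem.Chars.find_spec hF
    obtain ⟨hpreF', hminF'⟩ := PySem.Chars.find_spec hF'
    set F := (PySem.Chars.find (a :: s') t).toNat with hFdef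
    set G := (PySem.Chars.find s' t).toNat with hGdef
    have h1 : F ≤ G + 1 := by
      by_contra hlt
      exact hminF (G + 1) (by omega) (by simpa [List.drop_succ_cons] using hpreF')
    have h2 : G + 1 ≤ F := by
      by_contra hlt
      have hF0 : F ≠ 0 := by
        intro h0
        exact hnp (by simpa [h0] using hpreF)
      obtain ⟨j, hj⟩ : ∃ j, F = j + 1 := ⟨F - 1, by omega⟩
      have hj2 : t <+: s'.drop j := by
        have h := hpreF
        rw [hj] at h
        simpa [List.drop_succ_cons] using h
      exact hminF' j (by omega) hj2
    exact ⟨hin.trans hin'.symm, fun _ => by omega⟩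
  · have hinF : PySem.Chars.isIn t (a :: s') = false := by
      rw [PySem.Chars.isIn_eq_false_iff]
      intro hinf
      rcases List.infix_cons_iff.mp hinf with h | h
      · exact hnp h
      · exact hin' ((PySem.Chars.isIn_iff_infix _ _).mpr h)
    refine ⟨?_, fun h => absurd h hin'⟩
    rw [hinF, (Bool.eq_false_iff.mpr hin')]

-- pvFindAt computes exactly  `if t in s[pos:] then pos + s[pos:].find(t) else -1`
lemma pv_findAt_char (t s : List Char) (pos : Nat) (hpos : pos ≤ s.length) :
    pvFindAt t s pos
      = if PySem.Chars.isIn t (s.drop pos) then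
          ((pos + (PySem.Chars.find (s.drop pos) t).toNat : Nat) : Int) else -1 := by
  have main : ∀ n pos, s.length - pos = n → pos ≤ s.length →
      pvFindAt t s pos
        = if PySem.Chars.isIn t (s.drop pos) then
            ((pos + (PySem.Chars.find (s.drop pos) t).toNat : Nat) : Int) else -1 := by
    intro n
    induction n with
    | zero =>
      intro pos hn hle
      have hpl : pos = s.length := by omega
      have hdrop : s.drop pos = [] := List.drop_eq_nil_of_le (by omega)
      rw [pvFindAt, hdrop]
      cases t with
      | nil =>
        have hg : pos + ([] : List Char).length ≤ s.length := by simp [hpl]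
        rw [dif_pos hg, if_pos (by simp [PySem.Chars.startswith_iff])]
        simp [PySem.Chars.isIn_nil, PySem.Chars.find_nil]
      | cons c t' =>
        have hg : ¬ (pos + (c :: t').length ≤ s.length) := by simp [hpl]
        rw [dif_neg hg]
        have hin : PySem.Chars.isIn (c :: t') [] = false :=
          (PySem.Chars.isIn_eq_false_iff _ _).mpr (by simp)
        rw [if_neg (by simp [hin])]
    | succ n ihn =>
      intro pos hn hle
      have hlt : pos < s.length := by omega
      have hdrop : s.drop pos = s[pos] :: s.drop (pos + 1) := List.drop_eq_getElem_cons hlt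
      by_cases hsw : PySem.Chars.startswith (s.drop pos) t = true
      · have hpre : t <+: s.drop pos := (PySem.Chars.startswith_iff _ _).mp hsw
        have hlen : t.length ≤ s.length - pos := by
          have := hpre.length_le
          simpa [List.length_drop] using this
        rw [pvFindAt, dif_pos (by omega), if_pos hsw]
        rw [if_pos ((PySem.Chars.isIn_iff_infix _ _).mpr hpre.isInfix),
            pv_find_of_prefix t _ hpre]
        simp
      · have hnp : ¬ t <+: s.drop pos := fun h => hsw ((PySem.Chars.startswith_iff _ _).mpr h)
        obtain ⟨hiff, hplus⟩ := by
          have := pv_find_cons t s[pos] (s.drop (pos + 1)) (hdrop ▸ hnp)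
          rwa [← hdrop] at this
        by_cases hg : pos + t.length ≤ s.length
        · rw [pvFindAt, dif_pos hg, if_neg hsw,
              ihn (pos + 1) (by omega) (by omega)]
          by_cases hin' : PySem.Chars.isIn t (s.drop (pos + 1)) = true
          · rw [if_pos hin', if_pos (by rw [hiff]; exact hin'), hplus hin']
            push_cast
            ring
          · rw [if_neg hin', if_neg (by rw [hiff]; exact hin')]
        · rw [pvFindAt, dif_neg hg]
          have hni : ¬ (t <:+: s.drop pos) := by
            intro hinf
            have := hinf.length_le
            rw [List.length_drop] at this
            omega
          rw [if_neg (by simp [(PySem.Chars.isIn_eq_false_iff _ _).mpr hni])]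
  exact main (s.length - pos) pos rfl hpos

-- A's group loop on the suffix string equals the position-carrying matcher
lemma pv_check_eq_subseq (tokens : List String) (h : tokens ≠ []) (s : List Char)
    (pos : Nat) (hpos : pos ≤ s.length) (temp : String) (ht : temp.toList = s.drop pos) :
    pvCheckA tokens temp = pvSubseq tokens s pos := by
  induction tokens generalizing temp pos with
  | nil => exact absurd rfl h
  | cons t rest ih =>
    rw [pvCheckA, pvSubseq]
    simp only [pv_findAt_char t.toList s pos hpos]
    by_cases hin : PySem.Chars.isIn t.toList (s.drop pos) = true
    · have hinS : PySem.Str.isIn t temp = true := by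
        rw [PySem.Str.isIn_eq, ht]; exact hin
      set d := (PySem.Chars.find (s.drop pos) t.toList).toNat with hd
      have hF : 0 ≤ PySem.Chars.find (s.drop pos) t.toList :=
        (PySem.Chars.find_nonneg_iff _ _).mpr ((PySem.Chars.isIn_iff_infix _ _).mp hin)
      obtain ⟨hpreF, _⟩ := PySem.Chars.find_spec hF
      have hd_le : d ≤ s.length - pos := by
        have h1 := PySem.Chars.find_le_length (s.drop pos) t.toList
        rw [List.length_drop] at h1
        omega
      have hfit : t.toList.length ≤ s.length - pos - d := by
        have h1 := hpreF.length_le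
        rw [List.length_drop, List.length_drop] at h1
        omega
      rw [if_pos hinS, if_pos hin,
          if_neg (show ¬ (((pos + d : Nat) : Int) < 0) by omega)]
      simp only [Int.toNat_natCast]
      have hslice : (PySem.Str.slice temp (some (PySem.Str.find temp t + PySem.Str.len t)) none).toList
          = s.drop (pos + d + t.toList.length) := by
        rw [PySem.Str.toList_slice, PySem.Chars.slice_eq_listSlice,
            PySem.Str.find_eq, PySem.Str.len_eq, ht,
            PySem.List.slice_from _ (by omega : (0:Int) ≤ PySem.Chars.find (s.drop pos) t.toList + t.toList.length)]
        rw [List.drop_drop]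
        congr 1
        omega
      cases rest with
      | nil => rw [List.isEmpty_nil, if_pos rfl, pvSubseq]
      | cons u us =>
        rw [List.isEmpty_cons, if_neg Bool.false_ne_true]
        exact ih (by simp) (pos + d + t.toList.length) (by omega) _ hslice
    · rw [if_neg (by rw [PySem.Str.isIn_eq, ht]; exact hin)]
      simp only [if_neg hin]
      rw [if_pos (show (-1 : Int) < 0 by norm_num)]

-- an exhausted automaton is a fixed point of the scan
lemma pv_scan_nil (text : List Char) (idxs : List Nat) (pos : Nat) :
    pvScan1 text idxs ([], pos) = ([], pos) := by
  induction idxs with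
  | nil => rfl
  | cons i l ih => simpa [pvScan1, List.foldl_cons, pvStep] using ih

-- the parallel fold over per-index map is the map of the single-state folds
lemma pv_map_foldl (text : List Char) (L : List Nat) (sts : List (List String × Nat)) :
    L.foldl (fun s i => s.map (pvStep text i)) sts
      = sts.map (fun st => pvScan1 text L st) := by
  induction L generalizing sts with
  | nil => simp [pvScan1]
  | cons i l ih =>
    rw [List.foldl_cons, ih, List.map_map]
    rfl

lemma pv_findAt_stuck (t s : List Char) (p : Nat) (hp : s.length ≤ p) (ht : t ≠ []) :
    pvFindAt t s p = -1 := by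
  rw [pvFindAt, dif_neg]
  have : 1 ≤ t.length := List.length_pos_iff.mpr ht
  omega

lemma pv_findAt_succ (t s : List Char) (a : Nat)
    (hsw : ¬ PySem.Chars.startswith (s.drop a) t = true) :
    pvFindAt t s a = pvFindAt t s (a + 1) := by
  by_cases hg : a + t.length ≤ s.length
  · rw [pvFindAt, dif_pos hg, if_neg hsw]
  · rw [pvFindAt, dif_neg hg, pvFindAt, dif_neg (by omega)]

-- the single-automaton scan over the remaining indices computes exactly the reference matcher
lemma pv_scan_eq_subseq (text : List Char) :
    ∀ (k : Nat) (toks : List String) (pos a : Nat), text.length - a = k →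
      (∀ t ∈ toks, t.toList ≠ []) →
      (pvScan1 text (List.range' a (text.length - a)) (toks, pos)).1.isEmpty
        = pvSubseq toks text (max a pos) := by
  intro k
  induction k with
  | zero =>
    intro toks pos a hk htoks
    rw [hk]
    cases toks with
    | nil => simp [pvScan1, pvSubseq]
    | cons t rest =>
      have hstuck : pvFindAt t.toList text (max a pos) = -1 :=
        pv_findAt_stuck t.toList text (max a pos) (by omega) (htoks t (by simp))
      simp [pvScan1, pvSubseq, hstuck]
  | succ k ih =>
    intro toks pos a hk htoks
    have ha : a < text.length := by omega
    have hrange : List.range' a (text.length - a) = a :: List.range' (a + 1) (text.length - (a + 1)) := by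
      have h2 : text.length - (a + 1) = k := by omega
      rw [hk, h2, List.range'_succ]
    cases toks with
    | nil => simp [pv_scan_nil, pvSubseq]
    | cons t rest =>
      have hlen1 : 1 ≤ t.toList.length := List.length_pos_iff.mpr (htoks t (by simp))
      rw [hrange]
      have hstep : pvScan1 text (a :: List.range' (a + 1) (text.length - (a + 1))) (t :: rest, pos)
          = pvScan1 text (List.range' (a + 1) (text.length - (a + 1))) (pvStep text a (t :: rest, pos)) := rfl
      rw [hstep]
      by_cases hc : pos ≤ a ∧ PySem.Chars.startswith (text.drop a) t.toList = true
      · obtain ⟨hpa, hsw⟩ := hc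
        have hstep2 : pvStep text a (t :: rest, pos) = (rest, a + t.toList.length) := by
          simp [pvStep, hpa, hsw]
        rw [hstep2, ih rest (a + t.toList.length) (a + 1) (by omega)
              (fun u hu => htoks u (by simp [hu]))]
        -- right side: pvFindAt at max a pos = a hits immediately
        have hmax : max a pos = a := by omega
        have hpre : t.toList <+: text.drop a := (PySem.Chars.startswith_iff _ _).mp hsw
        have hfit : t.toList.length ≤ text.length - a := by
          have := hpre.length_le
          simpa [List.length_drop] using this
        have hfa : pvFindAt t.toList text a = (a : Int) := by
          rw [pvFindAt, dif_pos (by omega), if_pos hsw]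
        rw [pvSubseq, hmax]
        simp only [hfa]
        rw [if_neg (by omega)]
        simp only [Int.toNat_natCast]
        congr 1
        omega
      · have hstep2 : pvStep text a (t :: rest, pos) = (t :: rest, pos) := by
          simp only [pvStep]
          rw [if_neg hc]
        rw [hstep2, ih (t :: rest) pos (a + 1) (by omega) htoks]
        by_cases hpa : pos ≤ a
        · have hsw : ¬ PySem.Chars.startswith (text.drop a) t.toList = true := by
            intro h; exact hc ⟨hpa, h⟩
          have hm1 : max (a + 1) pos = a + 1 := by omega
          have hm2 : max a pos = a := by omega
          rw [hm1, hm2, pvSubseq, pvSubseq, ← pv_findAt_succ t.toList text a hsw]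
        · have hm : max (a + 1) pos = max a pos := by omega
          rw [hm]

-- each group's matched flag after the full scan equals A's check on the whole string
lemma pv_cond_eq (text : List Char) (allStr : String) (ht : allStr.toList = text)
    (g : List String) (hg : g ≠ []) (htoks : ∀ t ∈ g, t.toList ≠ []) :
    (pvScan1 text (List.range text.length) (g, 0)).1.isEmpty = pvCheckA g allStr := by
  rw [List.range_eq_range']
  have h0 : text.length = text.length - 0 := rfl
  rw [h0, pv_scan_eq_subseq text (text.length - 0) g 0 0 rfl htoks]
  rw [pv_check_eq_subseq g hg text 0 (by omega) allStr (by simpa using ht)]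
  rfl

-- the two outer selections agree pair by pair
lemma pv_outer_eq_pick (pairs : List (List String × String))
    (hne : ∀ p ∈ pairs, p.1 ≠ [] ∧ ∀ t ∈ p.1, t.toList ≠ [])
    (a : String) (text : List Char) (ha : a.toList = text) :
    pvOuterA pairs a
      = pvPickB2 ((pairs.map (fun p => pvScan1 text (List.range text.length) (p.1, 0))).zip
                  (pairs.map Prod.snd)) := by
  induction pairs with
  | nil => rfl
  | cons p rest ih =>
    obtain ⟨g, lbl⟩ := p
    obtain ⟨hg, htoks⟩ := hne (g, lbl) (List.mem_cons_self ..)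
    rw [pvOuterA]
    simp only [List.map_cons, List.zip_cons_cons]
    rw [pvPickB2, pv_cond_eq text a ha g hg htoks]
    rw [ih (fun q hq => hne q (by simp [hq]))]

-- ===== VERDICT (by name: the statement is the Claim_ definition above) =====
theorem post_process_4_spec : Claim_equal_post_process_4 := by
  intro input _
  unfold Spec_post_process_4 post_process_4
  simp only [post_process_4_alt]
  rw [pv_map_foldl]
  have htext : (pvAllA input).toList = (pvTextB input).toList := pv_all_eq_text input
  rw [pv_outer_eq_pick
        [(["i","e","u"], "第二組"), (["i","an","u"], "第三組"),
         (["i","s","i","u"], "第四組"), (["i","w","u","u"], "第五組"),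
         (["i","l","iu","u"], "第六組"), (["i","yi","u"], "第一組")]
        (by intro p hp; fin_cases hp <;> exact ⟨by simp, by intro t ht; fin_cases ht <;> simp⟩)
        (pvAllA input) (pvTextB input).toList htext]
  rfl
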